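-- pv_equiv track=rewrite | github.com/tushar7058/PythonInterview | Questions/30Questions/catandhat.py | cat_hat
-- ===== SOURCE A (Python) =====
-- def cat_hat(str):
--
--     cat_count =0
--     hat_count = 0
--
--     for i in range (len(str)-2):
--         sub = str[i:i+3]
--         if sub =='cat':
--             cat_count+=1
--         elif sub=='hat':
--             hat_count+=1
--     return cat_count == hat_count
-- ===== SOURCE B (Python) =====
-- def cat_hat(str):
--     # single-pass character state machine: remember the previous two characters
--     # and keep one signed balance (+1 for c-a-t, -1 for h-a-t); zero iff equal counts
--     bal = 0
--     p2 = p1 = None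
--     for c in str:
--         if c == 't' and p1 == 'a':
--             if p2 == 'c':
--                 bal += 1
--             elif p2 == 'h':
--                 bal -= 1
--         p2, p1 = p1, c
--     return bal == 0
-- ===== Notes on version B (the rewrite author's own statement) =====
-- stated objective: faster
-- what changed: Replaces the per-index 3-character slicing loop with two counters by a single character-at-a-time state machine that remembers the previous two characters and maintains one signed balance (+1 on c,a,t and -1 on h,a,t), returning whether the balance is zero; no slice objects are allocated.
import Mathlib
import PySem

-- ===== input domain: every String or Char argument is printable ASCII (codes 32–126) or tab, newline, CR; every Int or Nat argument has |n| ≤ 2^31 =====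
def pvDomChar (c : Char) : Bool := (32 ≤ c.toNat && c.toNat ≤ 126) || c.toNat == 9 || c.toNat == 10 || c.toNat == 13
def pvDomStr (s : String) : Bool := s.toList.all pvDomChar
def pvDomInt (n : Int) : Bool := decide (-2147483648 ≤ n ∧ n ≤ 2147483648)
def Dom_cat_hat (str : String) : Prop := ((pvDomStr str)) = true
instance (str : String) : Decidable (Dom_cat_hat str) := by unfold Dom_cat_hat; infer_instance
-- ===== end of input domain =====

-- B replaces A's index/slice sliding-window loop with two counters by a single
-- character-at-a-time state machine (two remembered previous chars, one signed
-- balance +1 on c-a-t / -1 on h-a-t); objective: faster (measured; no per-window slice allocation).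

-- ===== PORT A =====
-- literal port of the sliding-window loop: for i in range(len(str)-2): sub = str[i:i+3]; …
def cat_hat (str : String) : Bool :=
  let s := str.toList
  let r := (PySem.List.pyRange 0 (PySem.Str.len str - 2) 1).foldl
    (fun (acc : Int × Int) i =>
      let sub := PySem.List.slice s (some i) (some (i + 3))
      if sub = "cat".toList then (acc.1 + 1, acc.2)
      else if sub = "hat".toList then (acc.1, acc.2 + 1)
      else acc) (0, 0)
  r.1 == r.2

-- ===== PORT B =====
-- one step of B's loop body: state = (prev-prev char, prev char, balance)
def catHatStep (st : Option Char × Option Char × Int) (c : Char) :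
    Option Char × Option Char × Int :=
  let bal :=
    if c = 't' ∧ st.2.1 = some 'a' then
      if st.1 = some 'c' then st.2.2 + 1
      else if st.1 = some 'h' then st.2.2 - 1
      else st.2.2
    else st.2.2
  (st.2.1, some c, bal)

def cat_hat_alt (str : String) : Bool :=
  let r := str.toList.foldl catHatStep (none, none, 0)
  r.2.2 == 0

-- ===== PRECONDITION & SPEC =====
def Spec_cat_hat (str : String) (out : Bool) : Prop := out = cat_hat_alt str
instance (str : String) (out : Bool) : Decidable (Spec_cat_hat str out) := by unfold Spec_cat_hat; infer_instance

-- ===== CLAIM (what is proved, stated in full; the proofs are below) =====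
def Claim_equal_cat_hat : Prop := ∀ (str : String), Dom_cat_hat str → Spec_cat_hat str (cat_hat str)

-- ===== LEMMAS AND PROOFS =====

-- number of window positions in l at which p occurs (overlapping count)
def pvOcc (p : List Char) : List Char → Nat
  | [] => 0
  | c :: t => (if p.isPrefixOf (c :: t) then 1 else 0) + pvOcc p t

-- A's fused fold = the two window counts, componentwise
theorem pvFoldl_pair (s : List Char) :
    ∀ (L : List Int) (a b : Int),
      (L.foldl (fun (acc : Int × Int) i =>
        let sub := PySem.List.slice s (some i) (some (i + 3))
        if sub = ['c', 'a', 't'] then (acc.1 + 1, acc.2)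
        else if sub = ['h', 'a', 't'] then (acc.1, acc.2 + 1)
        else acc) (a, b))
      = (a + (L.countP (fun i => PySem.List.slice s (some i) (some (i + 3)) = ['c', 'a', 't']) : Int),
         b + (L.countP (fun i => PySem.List.slice s (some i) (some (i + 3)) = ['h', 'a', 't']) : Int)) := by
  intro L
  induction L with
  | nil => intro a b; simp
  | cons x L ih =>
      intro a b
      simp only [List.foldl_cons, List.countP_cons]
      by_cases h1 : PySem.List.slice s (some x) (some (x + 3)) = ['c', 'a', 't']
      · have h2 : PySem.List.slice s (some x) (some (x + 3)) ≠ ['h', 'a', 't'] := by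
          rw [h1]; decide
        simp only [h1, if_true, ih]
        simp [Prod.ext_iff]
        omega
      · by_cases h2 : PySem.List.slice s (some x) (some (x + 3)) = ['h', 'a', 't']
        · simp only [if_neg h1, if_pos h2, ih]
          simp [h2, Prod.ext_iff]
          omega
        · simp only [if_neg h1, if_neg h2, ih]
          simp [h1, h2]

-- the overlapping window count as a countP over all start positions
theorem pvOcc_eq_countP (p : List Char) (l : List Char) :
    pvOcc p l = (List.range l.length).countP (fun i => p.isPrefixOf (l.drop i)) := by
  induction l with
  | nil => simp [pvOcc]
  | cons c t ih =>
      simp only [pvOcc, List.length_cons, List.range_succ_eq_map, List.countP_cons,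
        List.countP_map, List.drop_zero]
      have : (List.countP ((fun i => p.isPrefixOf ((c :: t).drop i)) ∘ fun i => i + 1) (List.range t.length))
           = List.countP (fun i => p.isPrefixOf (t.drop i)) (List.range t.length) := by
        apply List.countP_congr; intro i _; simp [Function.comp]
      rw [ih, this]
      split_ifs with h <;> omega

-- positions past length-3 can never match a length-3 pattern
theorem pvCountP_trim (p : List Char) (hp : p.length = 3) (l : List Char) (hl : 2 ≤ l.length) :
    (List.range l.length).countP (fun i => p.isPrefixOf (l.drop i))
      = (List.range (l.length - 2)).countP (fun i => p.isPrefixOf (l.drop i)) := by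
  obtain ⟨n, hn⟩ : ∃ n, l.length = n + 2 := ⟨l.length - 2, by omega⟩
  rw [hn]
  simp only [Nat.add_sub_cancel]
  rw [List.range_add, List.countP_append]
  have : (List.map (fun x => n + x) (List.range 2)).countP
      (fun i => p.isPrefixOf (l.drop i)) = 0 := by
    rw [List.countP_eq_zero]
    intro i hi
    simp only [List.mem_map, List.mem_range] at hi
    obtain ⟨x, hx, rfl⟩ := hi
    rw [Bool.not_eq_true, Bool.eq_false_iff]
    intro hpre
    rw [List.isPrefixOf_iff_prefix] at hpre
    have := hpre.length_le
    simp only [List.length_drop, hp] at this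
    omega
  rw [this]
  omega

-- countP with take-3-equality equals countP with isPrefixOf
theorem pvCountP_take (p : List Char) (hp : p.length = 3) (l : List Char) (L : List Nat) :
    L.countP (fun i => (l.drop i).take 3 = p) = L.countP (fun i => p.isPrefixOf (l.drop i)) := by
  apply List.countP_congr
  intro i _
  simp only [decide_eq_true_eq, List.isPrefixOf_iff_prefix]
  constructor
  · intro h; rw [← h]; exact List.take_prefix _ _
  · intro h; rw [List.prefix_iff_eq_take, hp] at h; exact h.symm

-- main window-count characterisation: A's countP over range(len-2) = pvOcc
theorem pvWindows (p : List Char) (hp : p.length = 3) (l : List Char) (hl : 2 ≤ l.length) :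
    (List.range (l.length - 2)).countP
        (fun (i : Nat) => PySem.List.slice l (some (i : Int)) (some ((i : Int) + 3)) = p)
      = pvOcc p l := by
  have hs : ∀ i : Nat, PySem.List.slice l (some (i : Int)) (some ((i : Int) + 3))
      = (l.drop i).take 3 := by
    intro i
    have : ((i : Int) + 3) = ((i : Int) + ((3 : Nat) : Int)) := by norm_num
    rw [this, PySem.List.slice_natCast_add]
  have : (List.range (l.length - 2)).countP
        (fun (i : Nat) => PySem.List.slice l (some (i : Int)) (some ((i : Int) + 3)) = p)
      = (List.range (l.length - 2)).countP (fun i => (l.drop i).take 3 = p) := by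
    apply List.countP_congr; intro i _; simp [hs i]
  rw [this, pvCountP_take p hp, ← pvCountP_trim p hp l hl, ← pvOcc_eq_countP]

-- short strings: the window count is zero
theorem pvOcc_short (p : List Char) (hp : p.length = 3) (l : List Char) (hl : l.length < 3) :
    pvOcc p l = 0 := by
  induction l with
  | nil => simp [pvOcc]
  | cons c t ih =>
      simp only [pvOcc]
      have hpre : p.isPrefixOf (c :: t) = false := by
        rw [Bool.eq_false_iff]; intro h
        rw [List.isPrefixOf_iff_prefix] at h
        have := h.length_le
        simp_all; omega
      simp only [List.length_cons] at hl
      simp [hpre, ih (by omega)]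

-- A equals "the two overlapping window counts agree"
theorem pvA (str : String) :
    cat_hat str = ((pvOcc ['c','a','t'] str.toList : Int) == (pvOcc ['h','a','t'] str.toList : Int)) := by
  unfold cat_hat
  simp only [PySem.Str.len_eq,
    show ("cat".toList : List Char) = ['c','a','t'] from rfl,
    show ("hat".toList : List Char) = ['h','a','t'] from rfl]
  by_cases h2 : 2 ≤ str.toList.length
  · have hr : ((str.toList.length : Int) - 2) = ((str.toList.length - 2 : Nat) : Int) := by omega
    rw [hr, PySem.List.pyRange_zero_natCast, pvFoldl_pair]
    simp only [List.countP_map, Function.comp_def]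
    rw [pvWindows ['c','a','t'] (by decide) str.toList h2,
        pvWindows ['h','a','t'] (by decide) str.toList h2]
    simp
  · have hpr : PySem.List.pyRange 0 ((str.toList.length : Int) - 2) 1 = [] := by
      interval_cases hll : str.toList.length <;> decide
    rw [hpr]
    simp [pvOcc_short ['c','a','t'] (by decide) str.toList (by omega),
          pvOcc_short ['h','a','t'] (by decide) str.toList (by omega)]

-- the signed balance of the two window counts
def pvBal (l : List Char) : Int :=
  (pvOcc ['c','a','t'] l : Int) - (pvOcc ['h','a','t'] l : Int)

-- B's fold, once both memory slots are filled, adds the balance of the list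
-- extended with the two remembered characters
theorem pvFold_some (l : List Char) : ∀ (x y : Char) (bal : Int),
    (l.foldl catHatStep (some x, some y, bal)).2.2 = bal + pvBal (x :: y :: l) := by
  induction l with
  | nil =>
      intro x y bal
      simp [pvBal, pvOcc_short ['c','a','t'] (by decide) [x, y] (by simp),
            pvOcc_short ['h','a','t'] (by decide) [x, y] (by simp)]
  | cons c t ih =>
      intro x y bal
      simp only [List.foldl_cons]
      have hstep : catHatStep (some x, some y, bal) c
          = (some y, some c,
             bal + (if ['c','a','t'].isPrefixOf (x :: y :: c :: t) then (1:Int) else 0)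
                 - (if ['h','a','t'].isPrefixOf (x :: y :: c :: t) then (1:Int) else 0)) := by
        simp only [catHatStep, List.isPrefixOf, Bool.and_true]
        by_cases hc : c = 't' ∧ some y = some 'a'
        · obtain ⟨hc1, hc2⟩ := hc
          have hy : y = 'a' := by simpa using hc2
          subst hc1; subst hy
          by_cases hx : some x = some 'c'
          · have : x = 'c' := by simpa using hx
            subst this
            simp
          · have hxc : x ≠ 'c' := fun h => hx (by rw [h])
            by_cases hx2 : some x = some 'h'
            · have : x = 'h' := by simpa using hx2
              subst this
              simp
            · have hxh : x ≠ 'h' := fun h => hx2 (by rw [h])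
              simp [hx, hx2, Ne.symm hxc, Ne.symm hxh]
        · rw [if_neg hc]
          rcases not_and_or.mp hc with h | h
          · have ht : ('t' : Char) ≠ c := fun hh => h hh.symm
            simp [ht]
          · have ha : ('a' : Char) ≠ y := fun hh => h (by rw [← hh])
            simp [ha]
      rw [hstep, ih]
      simp only [pvBal, pvOcc]
      split_ifs <;> push_cast <;> ring

-- B equals "the signed balance of the whole string is zero"
theorem pvB (str : String) :
    cat_hat_alt str = (pvBal str.toList == 0) := by
  unfold cat_hat_alt
  match hl : str.toList with
  | [] =>
      simp [pvBal, pvOcc]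
  | [a] =>
      have hstep : catHatStep (none, none, 0) a = (none, some a, 0) := by
        simp [catHatStep]
      simp only [List.foldl_cons, List.foldl_nil, hstep]
      simp [pvBal, pvOcc_short ['c','a','t'] (by decide) [a] (by simp),
            pvOcc_short ['h','a','t'] (by decide) [a] (by simp)]
  | a :: b :: t =>
      have h1 : catHatStep (none, none, 0) a = (none, some a, 0) := by
        simp [catHatStep]
      have h2 : catHatStep (none, some a, 0) b = (some a, some b, 0) := by
        simp only [catHatStep]
        split_ifs <;> simp_all
      simp only [List.foldl_cons, h1, h2]
      rw [pvFold_some]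
      simp

theorem pv_main (str : String) : cat_hat str = cat_hat_alt str := by
  rw [pvA, pvB]
  simp only [pvBal]
  by_cases h : (pvOcc ['c','a','t'] str.toList : Int) = (pvOcc ['h','a','t'] str.toList : Int)
  · rw [h]; simp
  · have h2 : (pvOcc ['c','a','t'] str.toList : Int) - (pvOcc ['h','a','t'] str.toList : Int) ≠ 0 := by omega
    simp [h, h2]

-- ===== VERDICT (by name: the statement is the Claim_ definition above) =====
theorem cat_hat_spec : Claim_equal_cat_hat := by
  intro str _
  unfold Spec_cat_hat
  exact pv_main str
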